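-- pv_equiv track=rewrite | github.com/chrstf/cookbook | pytools/outils.py | extract_head
-- ===== SOURCE A (Python) =====
-- def extract_head(md: str) -> str:
--     keep = []
--     collect = False
--     for line in md.splitlines():
--         if line[:3] == '---':
--             if collect is False:
--                 collect = True
--                 continue
--             else:
--                 break
--         if collect is True:
--             keep.append(line)
--     keep = '\n'.join(keep)
--     return keep
-- ===== SOURCE B (Python) =====
-- def extract_head(md: str) -> str:
--     lines = md.splitlines()
--     delims = [i for i, line in enumerate(lines) if line.startswith('---')]
--     if not delims:
--         return ''
--     start = delims[0]
--     end = delims[1] if len(delims) > 1 else len(lines)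
--     return '\n'.join(lines[start + 1:end])
-- ===== Notes on version B (the rewrite author's own statement) =====
-- stated objective: alternative
-- what changed: Replaces A's flag-driven single pass (collect boolean, append, early break) by collecting the indices of all delimiter lines in one comprehension and slicing the line list between the first delimiter and the second (or the end of the list).
import Mathlib
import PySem

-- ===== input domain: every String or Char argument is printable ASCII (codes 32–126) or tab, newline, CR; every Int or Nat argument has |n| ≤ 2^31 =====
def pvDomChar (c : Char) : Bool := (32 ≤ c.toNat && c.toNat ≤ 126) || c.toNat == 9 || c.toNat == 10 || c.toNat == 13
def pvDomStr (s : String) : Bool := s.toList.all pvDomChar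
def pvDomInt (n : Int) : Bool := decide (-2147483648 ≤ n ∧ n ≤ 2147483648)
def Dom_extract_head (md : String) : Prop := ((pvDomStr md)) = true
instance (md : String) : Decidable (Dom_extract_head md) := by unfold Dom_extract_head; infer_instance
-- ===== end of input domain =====

-- B locates the delimiter lines once (indices of lines starting with '---') and slices
-- between the first two, instead of A's flag-driven accumulating loop: objective 'alternative'.

-- ===== PORT A =====
-- A's for-loop with the 'collect' flag and early break, as structural recursion.
def pvLoopA : List String → List String → Bool → List String
  | [], keep, _ => keep
  | l :: ls, keep, collect =>
    if PySem.Str.slice l none (some 3) = "---" then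
      if collect = false then pvLoopA ls keep true
      else keep
    else
      if collect = true then pvLoopA ls (keep ++ [l]) collect
      else pvLoopA ls keep collect

def extract_head (md : String) : String :=
  PySem.Str.join "\n" (pvLoopA (PySem.Str.splitlines md) [] false)

-- ===== PORT B =====
def extract_head_alt (md : String) : String :=
  let lines := PySem.Str.splitlines md
  let delims := (PySem.List.enumerate lines 0).filterMap
    (fun il => if PySem.Str.startswith il.2 "---" then some il.1 else none)
  match delims with
  | [] => ""
  | s :: rest =>
    let e : Int := match rest with | e :: _ => e | [] => (lines.length : Int)
    PySem.Str.join "\n" (PySem.List.slice lines (some (s + 1)) (some e))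

-- ===== PRECONDITION & SPEC =====
def Spec_extract_head (md : String) (out : String) : Prop := out = extract_head_alt md
instance (md : String) (out : String) : Decidable (Spec_extract_head md out) := by unfold Spec_extract_head; infer_instance

-- ===== CLAIM (what is proved, stated in full; the proofs are below) =====
def Claim_equal_extract_head : Prop := ∀ (md : String), Dom_extract_head md → Spec_extract_head md (extract_head md)

-- ===== LEMMAS AND PROOFS =====

-- the delimiter test
def pvP (l : String) : Bool := PySem.Str.startswith l "---"

lemma pvCond_eq (l : String) : (PySem.Str.slice l none (some 3) = "---") ↔ pvP l = true := by
  rw [pvP, ← String.toList_inj]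
  simp [PySem.Str.toList_slice, PySem.Str.startswith_eq, PySem.Chars.startswith_iff]
  rw [show ((3:Int) = ((3:Nat):Int)) from rfl, PySem.List.slice_to_natCast]
  constructor
  · intro h; exact h ▸ List.take_prefix 3 l.toList
  · intro h; rw [List.prefix_iff_eq_take.mp h]; rfl

-- delimiter indices as naturals
def pvND : List String → Nat → List Nat
  | [], _ => []
  | l :: ls, s => if pvP l then s :: pvND ls (s + 1) else pvND ls (s + 1)

lemma pvDelims_eq (ls : List String) : ∀ s : Nat,
    (PySem.List.enumerate ls (s : Int)).filterMap
      (fun il => if PySem.Str.startswith il.2 "---" then some il.1 else none)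
    = (pvND ls s).map (Nat.cast : Nat → Int) := by
  induction ls with
  | nil => intro s; simp [pvND, PySem.List.enumerate_nil]
  | cons l ls ih =>
    intro s
    have hc : ((s : Int) + 1) = (((s + 1 : Nat)) : Int) := by push_cast; ring
    rw [PySem.List.enumerate_cons, hc]
    by_cases hp : PySem.Str.startswith l "---" = true
    · simp only [List.filterMap_cons, hp, reduceIte, pvND, pvP, ih, List.map_cons]
    · rw [Bool.not_eq_true] at hp
      simp only [List.filterMap_cons, hp, Bool.false_eq_true, reduceIte, pvND, pvP, ih]

lemma pvDelims_eq0 (ls : List String) :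
    (PySem.List.enumerate ls 0).filterMap
      (fun il => if PySem.Str.startswith il.2 "---" then some il.1 else none)
    = (pvND ls 0).map (Nat.cast : Nat → Int) := by
  rw [show ((0:Int) = ((0:Nat):Int)) from by norm_num, pvDelims_eq]

lemma pvND_shift (ls : List String) : ∀ s : Nat, pvND ls (s + 1) = (pvND ls s).map (· + 1) := by
  induction ls with
  | nil => intro s; simp [pvND]
  | cons l ls ih =>
    intro s
    by_cases hp : pvP l = true <;> simp [pvND, hp, ih]

lemma pvND_nil_takeWhile (ls : List String) : ∀ s : Nat, pvND ls s = [] →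
    ls.takeWhile (fun x => !pvP x) = ls := by
  induction ls with
  | nil => intro s _; rfl
  | cons l ls ih =>
    intro s h
    by_cases hp : pvP l = true
    · simp [pvND, hp] at h
    · simp [pvND, hp] at h
      simp [hp, ih _ h]

lemma pvND_head_takeWhile (ls : List String) : ∀ e rest, pvND ls 0 = e :: rest →
    ls.takeWhile (fun x => !pvP x) = ls.take e := by
  induction ls with
  | nil => intro e rest h; simp [pvND] at h
  | cons l ls ih =>
    intro e rest h
    by_cases hp : pvP l = true
    · simp [pvND, hp] at h
      simp [hp, h.1.symm]
    · rw [pvND, if_neg hp, pvND_shift] at h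
      cases h0 : pvND ls 0 with
      | nil => rw [h0] at h; simp at h
      | cons e0 r0 =>
        rw [h0] at h
        simp at h
        rw [List.takeWhile_cons]
        simp [hp, ih _ _ h0, ← h.1]

lemma pvLoopA_true (ls : List String) : ∀ keep, pvLoopA ls keep true
    = keep ++ ls.takeWhile (fun x => !pvP x) := by
  induction ls with
  | nil => intro keep; simp [pvLoopA]
  | cons l ls ih =>
    intro keep
    by_cases hp : pvP l = true
    · rw [pvLoopA, if_pos ((pvCond_eq l).mpr hp)]
      simp [hp]
    · rw [pvLoopA, if_neg (fun hc => hp ((pvCond_eq l).mp hc))]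
      simp only [ih]
      simp [hp]

-- B's body as a function of the line list
def pvBodyB (ls : List String) : String :=
  match pvND ls 0 with
  | [] => ""
  | s :: rest =>
    PySem.Str.join "\n" ((ls.drop (s + 1)).take
      ((match rest with | e :: _ => e | [] => ls.length) - (s + 1)))

lemma pvAlt_eq_body (md : String) : extract_head_alt md = pvBodyB (PySem.Str.splitlines md) := by
  unfold extract_head_alt pvBodyB
  simp only [pvDelims_eq0]
  cases h0 : pvND (PySem.Str.splitlines md) 0 with
  | nil => rfl
  | cons s rest =>
    cases rest with
    | nil =>
      show PySem.Str.join "\n" (PySem.List.slice _ (some ((s:Int) + 1))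
          (some (((PySem.Str.splitlines md).length : Nat) : Int)))
        = PySem.Str.join "\n" (((PySem.Str.splitlines md).drop (s+1)).take
          ((PySem.Str.splitlines md).length - (s+1)))
      rw [show ((s : Int) + 1 = (((s + 1 : Nat)) : Int)) from by push_cast; ring,
        PySem.List.slice_natCast]
    | cons e0 r0 =>
      show PySem.Str.join "\n" (PySem.List.slice _ (some ((s:Int) + 1)) (some ((e0 : Nat) : Int)))
        = PySem.Str.join "\n" (((PySem.Str.splitlines md).drop (s+1)).take (e0 - (s+1)))
      rw [show ((s : Int) + 1 = (((s + 1 : Nat)) : Int)) from by push_cast; ring,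
        PySem.List.slice_natCast]

lemma pvMain (ls : List String) : PySem.Str.join "\n" (pvLoopA ls [] false) = pvBodyB ls := by
  induction ls with
  | nil => rfl
  | cons l ls ih =>
    by_cases hp : pvP l = true
    · rw [pvLoopA, if_pos ((pvCond_eq l).mpr hp), if_pos rfl, pvLoopA_true, List.nil_append]
      unfold pvBodyB
      rw [pvND, if_pos hp, pvND_shift]
      cases h0 : pvND ls 0 with
      | nil =>
        rw [pvND_nil_takeWhile ls 0 h0]
        simp
      | cons e0 r0 =>
        rw [pvND_head_takeWhile ls e0 r0 h0]
        simp
    · rw [pvLoopA, if_neg (fun hc => hp ((pvCond_eq l).mp hc)), if_neg (by simp), ih]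
      unfold pvBodyB
      rw [pvND, if_neg hp, pvND_shift]
      cases h0 : pvND ls 0 with
      | nil => simp
      | cons s rest =>
        simp only [List.map_cons, List.drop_succ_cons]
        cases rest with
        | nil =>
          simp only [List.map_nil, List.length_cons]
          congr 2
          omega
        | cons e0 r0 =>
          simp only [List.map_cons]
          congr 2
          omega

-- ===== VERDICT (by name: the statement is the Claim_ definition above) =====
theorem extract_head_spec : Claim_equal_extract_head := by
  intro md _
  unfold Spec_extract_head extract_head
  rw [pvAlt_eq_body, pvMain]
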